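-- pv_equiv track=rewrite | github.com/maranranu/coding-questions | max_score.py | max_score
-- ===== SOURCE A (Python) =====
-- def max_score(arr, score=0):
--     maxElem = arr[1]
--     maxIndex = 1
--
--     for i in range(2, len(arr)-1):
--         temp = arr[i]
--         if temp >= maxElem:
--             maxElem = temp
--             maxIndex = i
--     if maxElem == 0:
--         return score
--
--     if maxIndex > 0 and maxIndex < len(arr)-1:
--         score += arr[maxIndex]
--         arr[maxIndex-1] = 0
--         arr[maxIndex+1] = 0
--         arr[maxIndex] = 0
--
--     return max_score(arr, score)
-- ===== SOURCE B (Python) =====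
-- def max_score(arr, score=0):
--     # Sort the interior indices once by (value, index) descending and scan them
--     # with lazy deletion; stop as soon as the best remaining value is not positive.
--     n = len(arr)
--     order = sorted(range(1, n - 1), key=lambda i: (arr[i], i), reverse=True)
--     alive = [True] * n
--     for i in order:
--         if not alive[i]:
--             continue
--         v = arr[i]
--         if v <= 0:
--             break
--         score += v
--         alive[i - 1] = alive[i] = alive[i + 1] = False
--     return score
-- ===== Notes on version B (the rewrite author's own statement) =====
-- stated objective: faster
-- what changed: A recursively rescans the whole array for the interior argmax and zeroes its neighbours until the maximum is 0; B sorts the interior indices once by (value, index) descending and makes a single pass over them with an alive[] array (lazy deletion), stopping at the first non-positive value; Pre_ excludes len(arr) < 2 (A raises IndexError) and len(arr) == 2 with arr[1] != 0 (A recurses forever); equivalence is about the return value only (A zeroes entries of arr in place, B does not mutate arr).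
-- intended difference: On arrays of length >= 3 whose interior entries arr[1..n-2] are all strictly negative, A adds the largest (negative) interior value to the score before stopping, lowering the score, while B picks nothing and returns score unchanged, which is the intended greedy behaviour (never pick a value that decreases the score). — e.g. on max_score([5, -3, 4], 0): A returns -3, B returns 0
-- outside the precondition, e.g. on max_score([], 0): A raises IndexError, B returns 0; on max_score([1], 0): A raises IndexError, B returns 0; on max_score([3, 7], 0): A raises RecursionError, B returns 0
import Mathlib
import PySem

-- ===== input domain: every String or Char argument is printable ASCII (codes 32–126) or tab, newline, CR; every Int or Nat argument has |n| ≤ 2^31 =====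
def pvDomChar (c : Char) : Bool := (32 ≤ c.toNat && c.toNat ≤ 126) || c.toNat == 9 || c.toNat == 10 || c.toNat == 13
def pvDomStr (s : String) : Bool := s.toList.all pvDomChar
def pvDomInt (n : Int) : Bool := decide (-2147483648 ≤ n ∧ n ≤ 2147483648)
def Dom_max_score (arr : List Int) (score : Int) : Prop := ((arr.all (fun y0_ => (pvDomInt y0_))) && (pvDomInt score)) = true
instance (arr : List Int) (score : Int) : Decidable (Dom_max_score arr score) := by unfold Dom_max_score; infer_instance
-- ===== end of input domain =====

-- B sorts the interior indices once by (value, index) descending and scans them once with lazy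
-- deletion, stopping at the first non-positive value, instead of A's repeated full-array argmax
-- recursion; on all-negative interiors A lowers the score by one pick, B (intendedly) does not;
-- return-value equivalence only (Python A zeroes entries of arr in place, B does not mutate arr).


-- ===== PORT A =====
-- the fold over range(2, len(arr)-1) computing (maxElem, maxIndex)
def aStep (arr : List Int) : Int × Int :=
  (PySem.List.pyRange 2 ((arr.length : Int) - 1) 1).foldl
    (fun m i =>
      let temp := PySem.List.pyGetD arr i 0
      if m.1 ≤ temp then (temp, i) else m)
    (PySem.List.pyGetD arr 1 0, 1)

-- A's recursion, with fuel (arr.length + 1 calls always suffice on Pre_: each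
-- recursive call zeroes a nonzero interior entry)
def aLoop : Nat → List Int → Int → Int
  | 0, _, score => score
  | fuel + 1, arr, score =>
    let m := aStep arr
    if m.1 = 0 then score
    else if 0 < m.2 ∧ m.2 < (arr.length : Int) - 1 then
      aLoop fuel
        (PySem.List.pySetD (PySem.List.pySetD (PySem.List.pySetD arr (m.2 - 1) 0) (m.2 + 1) 0) m.2 0)
        (score + PySem.List.pyGetD arr m.2 0)
    else aLoop fuel arr score

def max_score (arr : List Int) (score : Int) : Int := aLoop (arr.length + 1) arr score

-- ===== PORT B =====
-- the for-loop over the sorted index list (break = return score)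
def bScan : List Int → List Int → List Bool → Int → Int
  | [], _, _, score => score
  | i :: rest, arr, alive, score =>
    if PySem.List.pyGetD alive i true = false then
      bScan rest arr alive score
    else
      let v := PySem.List.pyGetD arr i 0
      if v ≤ 0 then score
      else
        bScan rest arr
          (PySem.List.pySetD (PySem.List.pySetD (PySem.List.pySetD alive (i - 1) false) i false) (i + 1) false)
          (score + v)

def max_score_alt (arr : List Int) (score : Int) : Int :=
  let n := arr.length
  let order := PySem.List.sorted2 (PySem.List.pyRange 1 ((n : Int) - 1) 1)
      (fun i => PySem.List.pyGetD arr i 0) (fun i => i) true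
  bScan order arr (PySem.List.pyRepeat [true] (n : Int)) score

-- ===== PRECONDITION & SPEC =====
-- Pre_ excludes len(arr) < 2, where A raises IndexError on arr[1], and len(arr) == 2 with
-- arr[1] != 0, where A recurses forever on an unchanged array (RecursionError).
def Pre_max_score (arr : List Int) (score : Int) : Prop :=
  2 ≤ arr.length ∧ (arr.length = 2 → arr.getD 1 0 = 0)
instance (arr : List Int) (score : Int) : Decidable (Pre_max_score arr score) := by
  unfold Pre_max_score; infer_instance
def pvWitness_max_score : List Int × Int := ([1, 5, 2, 3], 0)

-- On arrays of length ≥ 3 whose interior entries arr[1..n-2] are all strictly negative, A adds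
-- the largest (negative) interior value to score before stopping, lowering the score; B picks
-- nothing and returns score unchanged, the intended greedy behaviour.
def D_max_score (arr : List Int) (score : Int) : Prop :=
  3 ≤ arr.length ∧
    ∀ j ∈ PySem.List.pyRange 1 ((arr.length : Int) - 1) 1, PySem.List.pyGetD arr j 0 < 0
instance (arr : List Int) (score : Int) : Decidable (D_max_score arr score) := by
  unfold D_max_score; infer_instance

def Spec_max_score (arr : List Int) (score : Int) (out : Int) : Prop :=
  ¬ D_max_score arr score → out = max_score_alt arr score
instance (arr : List Int) (score : Int) (out : Int) : Decidable (Spec_max_score arr score out) := by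
  unfold Spec_max_score; infer_instance

def pvDiffWitness_max_score : List Int × Int := ([5, -3, 4], 0)
def pvDiffWitnessOut_max_score : Int × Int := (-3, 0)

-- ===== CLAIM (what is proved, stated in full; the proofs are below) =====
def Claim_unchanged_max_score : Prop := ∀ (arr : List Int) (score : Int), Dom_max_score arr score → Pre_max_score arr score → Spec_max_score arr score (max_score arr score)
def Claim_changed_max_score : Prop := Dom_max_score (pvDiffWitness_max_score.1) (pvDiffWitness_max_score.2) ∧ Pre_max_score (pvDiffWitness_max_score.1) (pvDiffWitness_max_score.2) ∧ D_max_score (pvDiffWitness_max_score.1) (pvDiffWitness_max_score.2) ∧ max_score (pvDiffWitness_max_score.1) (pvDiffWitness_max_score.2) = pvDiffWitnessOut_max_score.1 ∧ max_score_alt (pvDiffWitness_max_score.1) (pvDiffWitness_max_score.2) = pvDiffWitnessOut_max_score.2 ∧ pvDiffWitnessOut_max_score.1 ≠ pvDiffWitnessOut_max_score.2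
def Claim_exact_max_score : Prop := ∀ (arr : List Int) (score : Int), Dom_max_score arr score → Pre_max_score arr score → D_max_score arr score → max_score arr score ≠ max_score_alt arr score

-- ===== LEMMAS AND PROOFS =====

-- lexicographic "strictly higher pick priority" (value, then index) between window indices
def lexGt (arr0 : List Int) (a b : Int) : Prop :=
  PySem.List.pyGetD arr0 b 0 < PySem.List.pyGetD arr0 a 0 ∨
    (PySem.List.pyGetD arr0 b 0 = PySem.List.pyGetD arr0 a 0 ∧ b < a)

-- "p dominates index j": A's running (maxElem, maxIndex) prefers p over (arr[j], j)
def domi (arr : List Int) (p : Int × Int) (j : Int) : Prop :=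
  PySem.List.pyGetD arr j 0 < p.1 ∨ (PySem.List.pyGetD arr j 0 = p.1 ∧ j ≤ p.2)

-- A's inner fold, named for the proofs
def amax (arr : List Int) (a b : Int) (init : Int × Int) : Int × Int :=
  (PySem.List.pyRange a b 1).foldl
    (fun m i =>
      let temp := PySem.List.pyGetD arr i 0
      if m.1 ≤ temp then (temp, i) else m) init

theorem aStep_eq_amax (arr : List Int) :
    aStep arr = amax arr 2 ((arr.length : Int) - 1) (PySem.List.pyGetD arr 1 0, 1) := rfl

theorem amax_nil (arr : List Int) (a b : Int) (h : b ≤ a) (init : Int × Int) :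
    amax arr a b init = init := by
  unfold amax
  rw [PySem.List.pyRange_one_eq_nil h]
  rfl

theorem amax_cons (arr : List Int) (a b : Int) (h : a < b) (init : Int × Int) :
    amax arr a b init =
      amax arr (a + 1) b
        (if init.1 ≤ PySem.List.pyGetD arr a 0 then (PySem.List.pyGetD arr a 0, a) else init) := by
  unfold amax
  rw [PySem.List.pyRange_one_cons h]
  rfl

theorem getD_setD {α : Type} (xs : List α) (i j : Int) (v d : α)
    (h0 : 0 ≤ i) (hi : i < (xs.length : Int)) (hj0 : 0 ≤ j) (hj : j < (xs.length : Int)) :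
    PySem.List.pyGetD (PySem.List.pySetD xs i v) j d =
      if j = i then v else PySem.List.pyGetD xs j d := by
  rw [PySem.List.pySetD_of_nonneg xs v h0]
  rw [PySem.List.pyGetD_eq_getElem xs d hj0 hj,
      PySem.List.pyGetD_eq_getElem (xs.set i.toNat v) d hj0 (by simpa using hj)]
  rw [List.getElem_set]
  split_ifs with h1 h2 h2 <;> first | rfl | omega

theorem len_setD {α : Type} (xs : List α) (i : Int) (v : α) :
    (PySem.List.pySetD xs i v).length = xs.length := by
  simp [PySem.List.length_pySetD]

-- array value after zeroing i-1, i+1, i (A's update order)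
theorem cv_set3 {α : Type} (xs : List α) (i : Int) (z : α)
    (h1 : 1 ≤ i) (h2 : i < (xs.length : Int) - 1)
    (j : Int) (hj0 : 0 ≤ j) (hj : j < (xs.length : Int)) (d : α) :
    PySem.List.pyGetD
      (PySem.List.pySetD (PySem.List.pySetD (PySem.List.pySetD xs (i-1) z) (i+1) z) i z) j d =
      if j = i - 1 ∨ j = i ∨ j = i + 1 then z else PySem.List.pyGetD xs j d := by
  have l1 : ((PySem.List.pySetD xs (i-1) z).length : Int) = (xs.length : Int) := by
    rw [len_setD]
  have l2 : ((PySem.List.pySetD (PySem.List.pySetD xs (i-1) z) (i+1) z).length : Int)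
      = (xs.length : Int) := by rw [len_setD, len_setD]
  rw [getD_setD _ i j z d (by omega) (by omega) hj0 (by omega)]
  rw [getD_setD _ (i+1) j z d (by omega) (by omega) hj0 (by omega)]
  rw [getD_setD _ (i-1) j z d (by omega) (by omega) hj0 hj]
  split_ifs <;> first | rfl | omega

-- alive value after killing i-1, i, i+1 (B's update order)
theorem av_set3 {α : Type} (xs : List α) (i : Int) (z : α)
    (h1 : 1 ≤ i) (h2 : i < (xs.length : Int) - 1)
    (j : Int) (hj0 : 0 ≤ j) (hj : j < (xs.length : Int)) (d : α) :
    PySem.List.pyGetD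
      (PySem.List.pySetD (PySem.List.pySetD (PySem.List.pySetD xs (i-1) z) i z) (i+1) z) j d =
      if j = i - 1 ∨ j = i ∨ j = i + 1 then z else PySem.List.pyGetD xs j d := by
  have l1 : ((PySem.List.pySetD xs (i-1) z).length : Int) = (xs.length : Int) := by
    rw [len_setD]
  have l2 : ((PySem.List.pySetD (PySem.List.pySetD xs (i-1) z) i z).length : Int)
      = (xs.length : Int) := by rw [len_setD, len_setD]
  rw [getD_setD _ (i+1) j z d (by omega) (by omega) hj0 (by omega)]
  rw [getD_setD _ i j z d (by omega) (by omega) hj0 (by omega)]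
  rw [getD_setD _ (i-1) j z d (by omega) (by omega) hj0 hj]
  split_ifs <;> first | rfl | omega

theorem foldmax (arr : List Int) : ∀ (k : Nat) (a b : Int), (b - a).toNat = k →
    ∀ (init : Int × Int),
    (amax arr a b init = init ∨
      (a ≤ (amax arr a b init).2 ∧ (amax arr a b init).2 < b ∧
       (amax arr a b init).1 = PySem.List.pyGetD arr (amax arr a b init).2 0)) ∧
    (∀ j : Int, a ≤ j → j < b → domi arr (amax arr a b init) j) ∧
    init.1 ≤ (amax arr a b init).1 := by
  intro k
  induction k with
  | zero =>
    intro a b hk init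
    rw [amax_nil arr a b (by omega) init]
    exact ⟨Or.inl rfl, fun j h1 h2 => absurd h2 (by omega), le_refl _⟩
  | succ k ih =>
    intro a b hk init
    rw [amax_cons arr a b (by omega) init]
    set init' := (if init.1 ≤ PySem.List.pyGetD arr a 0 then (PySem.List.pyGetD arr a 0, a)
      else init) with hinit'
    obtain ⟨H1, H2, H3⟩ := ih (a + 1) b (by omega) init'
    have hfst : PySem.List.pyGetD arr a 0 ≤ init'.1 ∧ init.1 ≤ init'.1 := by
      rw [hinit']; split_ifs with h
      · exact ⟨le_refl _, h⟩
      · exact ⟨le_of_lt (by omega), le_refl _⟩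
    refine ⟨?_, ?_, le_trans hfst.2 H3⟩
    · rcases H1 with h | ⟨ha, hb, hc⟩
      · rw [h, hinit']
        split_ifs with hc
        · exact Or.inr ⟨le_refl _, by omega, by simp⟩
        · exact Or.inl rfl
      · exact Or.inr ⟨by omega, hb, hc⟩
    · intro j hj1 hj2
      rcases lt_or_ge a j with haj | haj
      · exact H2 j (by omega) hj2
      · have hja : j = a := by omega
        subst hja
        rcases lt_or_eq_of_le (le_trans hfst.1 H3) with hlt | heq
        · exact Or.inl hlt
        · refine Or.inr ⟨heq, ?_⟩
          rcases H1 with h | ⟨ha', _, _⟩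
          · rw [h, hinit']
            split_ifs with hc
            · exact le_refl _
            · exfalso
              rw [h, hinit', if_neg hc] at heq
              omega
          · omega

theorem aStep_spec (arr : List Int) (hn : 3 ≤ arr.length) :
    (1 ≤ (aStep arr).2 ∧ (aStep arr).2 < (arr.length : Int) - 1 ∧
      (aStep arr).1 = PySem.List.pyGetD arr (aStep arr).2 0) ∧
    (∀ j : Int, 1 ≤ j → j < (arr.length : Int) - 1 → domi arr (aStep arr) j) := by
  obtain ⟨H1, H2, H3⟩ := foldmax arr ((arr.length : Int) - 1 - 2).toNat 2 ((arr.length : Int) - 1)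
    rfl (PySem.List.pyGetD arr 1 0, 1)
  rw [← aStep_eq_amax arr] at H1 H2 H3
  have hr2 : (1 ≤ (aStep arr).2 ∧ (aStep arr).2 < (arr.length : Int) - 1 ∧
      (aStep arr).1 = PySem.List.pyGetD arr (aStep arr).2 0) := by
    rcases H1 with h | ⟨ha, hb, hc⟩
    · rw [h]
      exact ⟨le_refl _, by push_cast; omega, rfl⟩
    · exact ⟨by omega, hb, hc⟩
  refine ⟨hr2, ?_⟩
  intro j hj1 hj2
  rcases lt_or_ge j 2 with hj | hj
  · have : j = 1 := by omega
    subst this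
    rcases lt_or_eq_of_le H3 with hlt | heq
    · exact Or.inl hlt
    · refine Or.inr ⟨heq, ?_⟩
      rcases H1 with h | ⟨ha, _, _⟩
      · rw [h]
      · omega
  · exact H2 j (by omega) hj2

theorem aStep_zero (arr : List Int) (hn : 3 ≤ arr.length)
    (hle : ∀ j : Int, 1 ≤ j → j < (arr.length : Int) - 1 → PySem.List.pyGetD arr j 0 ≤ 0)
    (hex : ∃ j : Int, 1 ≤ j ∧ j < (arr.length : Int) - 1 ∧ PySem.List.pyGetD arr j 0 = 0) :
    (aStep arr).1 = 0 := by
  obtain ⟨⟨h1, h2, h3⟩, hdom⟩ := aStep_spec arr hn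
  have hub : (aStep arr).1 ≤ 0 := by rw [h3]; exact hle _ h1 h2
  obtain ⟨j, hj1, hj2, hj3⟩ := hex
  have := hdom j hj1 hj2
  unfold domi at this
  omega

theorem aLoop_zero (f : Nat) (arr : List Int) (score : Int) (h : (aStep arr).1 = 0) :
    aLoop (f + 1) arr score = score := by
  simp [aLoop, h]

-- ===== insertion-sort (sorted2) characterisation =====

theorem insertBy_cons {α : Type} (before : α → α → Bool) (x y : α) (ys : List α) :
    PySem.List.insertBy before x (y :: ys) =
      if before x y then x :: y :: ys else y :: PySem.List.insertBy before x ys := rfl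

theorem insertBy_pairwise (before : Int → Int → Bool)
    (htr : ∀ a b c, before a b = true → before b c = true → before a c = true)
    (has : ∀ a b, before a b = true → before b a = true → False) (x : Int) :
    ∀ acc : List Int, acc.Pairwise (fun a b => before b a = false) →
      (PySem.List.insertBy before x acc).Pairwise (fun a b => before b a = false) := by
  intro acc
  induction acc with
  | nil => intro; simp [PySem.List.insertBy]
  | cons y ys ih =>
    intro h
    obtain ⟨hy, hys⟩ := List.pairwise_cons.mp h
    rw [insertBy_cons]
    split_ifs with hxy
    · refine List.pairwise_cons.mpr ⟨?_, h⟩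
      intro b hb
      rcases List.mem_cons.mp hb with rfl | hb
      · cases hcontra : before b x
        · rfl
        · exact absurd (has x b hxy hcontra) (fun h => h)
      · cases hcontra : before b x
        · rfl
        · exfalso
          have := htr b x y hcontra hxy
          rw [hy b hb] at this
          exact Bool.false_ne_true this
    · refine List.pairwise_cons.mpr ⟨?_, ih hys⟩
      intro b hb
      rcases (PySem.List.mem_insertBy before x b ys).mp hb with rfl | hb
      · cases hcontra : before b y
        · rfl
        · exact absurd hcontra (by simp [hxy])
      · exact hy b hb

theorem foldl_insert_pairwise (before : Int → Int → Bool)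
    (htr : ∀ a b c, before a b = true → before b c = true → before a c = true)
    (has : ∀ a b, before a b = true → before b a = true → False) :
    ∀ (xs acc : List Int), acc.Pairwise (fun a b => before b a = false) →
      (xs.foldl (fun acc x => PySem.List.insertBy before x acc) acc).Pairwise
        (fun a b => before b a = false) := by
  intro xs
  induction xs with
  | nil => intro acc h; exact h
  | cons x xs ih =>
    intro acc h
    exact ih _ (insertBy_pairwise before htr has x acc h)

theorem sorted2_rev_eq (xs : List Int) (k1 k2 : Int → Int) :
    PySem.List.sorted2 xs k1 k2 true =
      xs.foldl (fun acc x => PySem.List.insertBy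
        (fun a b => (decide (k1 b < k1 a) || (!decide (k1 a < k1 b) && decide (k2 b < k2 a))))
        x acc) [] := rfl

theorem sorted2_pairwise_lexGt (arr0 : List Int) (xs : List Int) (hnd : xs.Nodup) :
    (PySem.List.sorted2 xs (fun i => PySem.List.pyGetD arr0 i 0) (fun i => i) true).Pairwise
      (lexGt arr0) := by
  have hP : (PySem.List.sorted2 xs (fun i => PySem.List.pyGetD arr0 i 0) (fun i => i)
      true).Pairwise (fun a b =>
        (decide (PySem.List.pyGetD arr0 a 0 < PySem.List.pyGetD arr0 b 0) ||
         (!decide (PySem.List.pyGetD arr0 b 0 < PySem.List.pyGetD arr0 a 0) &&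
          decide (a < b))) = false) := by
    rw [sorted2_rev_eq]
    refine foldl_insert_pairwise _ ?_ ?_ xs [] List.Pairwise.nil
    · intro a b c hab hbc
      simp only [Bool.or_eq_true, Bool.and_eq_true, Bool.not_eq_true', decide_eq_true_eq,
        decide_eq_false_iff_not] at hab hbc ⊢
      omega
    · intro a b hab hba
      simp only [Bool.or_eq_true, Bool.and_eq_true, Bool.not_eq_true', decide_eq_true_eq,
        decide_eq_false_iff_not] at hab hba
      omega
  have hN : (PySem.List.sorted2 xs (fun i => PySem.List.pyGetD arr0 i 0) (fun i => i)
      true).Pairwise (fun a b : Int => a ≠ b) :=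
    ((PySem.List.sorted2_perm xs _ _ true).nodup_iff.mpr hnd)
  refine (hP.and hN).imp ?_
  intro a b hab
  obtain ⟨h1, h2⟩ := hab
  simp only [Bool.or_eq_false_iff, Bool.and_eq_false_iff, Bool.not_eq_false',
    decide_eq_false_iff_not, decide_eq_true_eq] at h1
  unfold lexGt
  rcases h1 with ⟨hv, h3⟩
  rcases h3 with h3 | h3
  · omega
  · omega

-- ===== the simulation invariant: A's recursion = B's scan (given some interior entry ≥ 0) =====

theorem key (arr0 : List Int) (hn3 : 3 ≤ arr0.length) :
    ∀ (s : List Int) (fuel : Nat) (arr : List Int) (alive : List Bool) (score : Int),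
    arr.length = arr0.length → alive.length = arr0.length →
    s.Pairwise (lexGt arr0) →
    (∀ i ∈ s, 1 ≤ i ∧ i < (arr0.length : Int) - 1) →
    (∀ j : Int, 1 ≤ j → j < (arr0.length : Int) - 1 →
      PySem.List.pyGetD alive j true = true → j ∈ s) →
    (∀ j : Int, 0 ≤ j → j < (arr0.length : Int) →
      PySem.List.pyGetD arr j 0 =
        if PySem.List.pyGetD alive j true = true then PySem.List.pyGetD arr0 j 0 else 0) →
    (∃ j0 : Int, 1 ≤ j0 ∧ j0 < (arr0.length : Int) - 1 ∧
      (PySem.List.pyGetD alive j0 true = false ∨ 0 ≤ PySem.List.pyGetD arr0 j0 0)) →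
    s.length + 2 ≤ fuel →
    aLoop fuel arr score = bScan s arr0 alive score := by
  intro s
  induction s with
  | nil =>
    intro fuel arr alive score hlen halen hpair hmem hC3 hC4 hInv hfuel
    obtain ⟨f, rfl⟩ : ∃ f, fuel = f + 1 := ⟨fuel - 1, by omega⟩
    have hN : (arr.length : Int) = (arr0.length : Int) := by rw [hlen]
    rw [show bScan [] arr0 alive score = score from rfl]
    refine aLoop_zero f arr score (aStep_zero arr (by omega) ?_ ?_)
    · intro j h1 h2
      have hdead : PySem.List.pyGetD alive j true = false := by
        cases h : PySem.List.pyGetD alive j true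
        · rfl
        · exact absurd (hC3 j h1 (by omega) h) (List.not_mem_nil)
      rw [hC4 j (by omega) (by omega), if_neg (by simp [hdead])]
    · refine ⟨1, le_refl _, by omega, ?_⟩
      have hdead : PySem.List.pyGetD alive 1 true = false := by
        cases h : PySem.List.pyGetD alive 1 true
        · rfl
        · exact absurd (hC3 1 (le_refl _) (by omega) h) (List.not_mem_nil)
      rw [hC4 1 (by omega) (by omega), if_neg (by simp [hdead])]
  | cons i rest IH =>
    intro fuel arr alive score hlen halen hpair hmem hC3 hC4 hInv hfuel
    have hN : (arr.length : Int) = (arr0.length : Int) := by rw [hlen]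
    have hA : (alive.length : Int) = (arr0.length : Int) := by rw [halen]
    obtain ⟨hi1, hi2⟩ := hmem i (List.mem_cons_self)
    obtain ⟨hpair1, hpair2⟩ := List.pairwise_cons.mp hpair
    cases halive : PySem.List.pyGetD alive i true with
    | false =>
      rw [show bScan (i :: rest) arr0 alive score
          = bScan rest arr0 alive score from by simp [bScan, halive]]
      refine IH fuel arr alive score hlen halen hpair2
        (fun j hj => hmem j (List.mem_cons_of_mem _ hj)) ?_ hC4 hInv
        (by simp at hfuel ⊢; omega)
      intro j h1 h2 ha
      rcases List.mem_cons.mp (hC3 j h1 h2 ha) with rfl | h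
      · rw [halive] at ha; exact absurd ha (by simp)
      · exact h
    | true =>
      have hvcur : PySem.List.pyGetD arr i 0 = PySem.List.pyGetD arr0 i 0 := by
        rw [hC4 i (by omega) (by omega), if_pos halive]
      have hBunfold : bScan (i :: rest) arr0 alive score =
          (if PySem.List.pyGetD arr0 i 0 ≤ 0 then score
           else bScan rest arr0
             (PySem.List.pySetD (PySem.List.pySetD (PySem.List.pySetD alive (i - 1) false)
               i false) (i + 1) false) (score + PySem.List.pyGetD arr0 i 0)) := by
        simp [bScan, halive]
      -- every live window value is bounded above by v = arr0[i], dead values are 0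
      have hdomall : ∀ j : Int, 1 ≤ j → j < (arr0.length : Int) - 1 →
          (PySem.List.pyGetD arr j 0 = 0 ∨
           PySem.List.pyGetD arr j 0 ≤ PySem.List.pyGetD arr0 i 0) := by
        intro j h1 h2
        cases haj : PySem.List.pyGetD alive j true with
        | false =>
          left; rw [hC4 j (by omega) (by omega), if_neg (by simp [haj])]
        | true =>
          right
          rw [hC4 j (by omega) (by omega), if_pos haj]
          rcases List.mem_cons.mp (hC3 j h1 h2 haj) with rfl | hjr
          · exact le_refl _
          · have := hpair1 j hjr
            unfold lexGt at this
            omega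
      by_cases hv : PySem.List.pyGetD arr0 i 0 ≤ 0
      · -- v ≤ 0 : both return score
        rw [hBunfold, if_pos hv]
        obtain ⟨f, rfl⟩ : ∃ f, fuel = f + 1 := ⟨fuel - 1, by omega⟩
        refine aLoop_zero f arr score (aStep_zero arr (by omega) ?_ ?_)
        · intro j h1 h2
          rcases hdomall j (by omega) (by omega) with h | h <;> omega
        · obtain ⟨j0, hj1, hj2, hd⟩ := hInv
          refine ⟨j0, hj1, by omega, ?_⟩
          cases haj : PySem.List.pyGetD alive j0 true with
          | false =>
            rw [hC4 j0 (by omega) (by omega), if_neg (by simp [haj])]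
          | true =>
            rcases hd with hd | hd
            · rw [haj] at hd; exact absurd hd (by simp)
            · -- j0 live with arr0[j0] ≥ 0; it is in i::rest so arr0[j0] ≤ v ≤ 0, hence 0
              have hv0 : PySem.List.pyGetD arr0 j0 0 ≤ PySem.List.pyGetD arr0 i 0 := by
                rcases List.mem_cons.mp (hC3 j0 hj1 hj2 haj) with rfl | hjr
                · exact le_refl _
                · have := hpair1 j0 hjr
                  unfold lexGt at this
                  omega
              rw [hC4 j0 (by omega) (by omega), if_pos haj]
              omega
      · -- v > 0 : A picks (v, i), B picks i; recurse
        have hvpos : 0 < PySem.List.pyGetD arr0 i 0 := by omega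
        rw [hBunfold, if_neg hv]
        obtain ⟨⟨hm1, hm2, hm3⟩, hm4⟩ := aStep_spec arr (by omega)
        have hstep2 : (aStep arr).2 = i := by
          cases haMi : PySem.List.pyGetD alive (aStep arr).2 true with
          | false =>
            exfalso
            have hz : PySem.List.pyGetD arr (aStep arr).2 0 = 0 := by
              rw [hC4 _ (by omega) (by omega), if_neg (by simp [haMi])]
            have hdo := hm4 i hi1 (by omega)
            unfold domi at hdo
            rw [hvcur] at hdo
            omega
          | true =>
            rcases List.mem_cons.mp (hC3 (aStep arr).2 hm1 (by omega) haMi) with h | h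
            · exact h
            · exfalso
              have hgt := hpair1 _ h
              have hdo := hm4 i hi1 (by omega)
              unfold lexGt at hgt
              unfold domi at hdo
              rw [hC4 _ (by omega) (by omega), if_pos haMi] at hm3
              rw [hvcur] at hdo
              omega
        have hstep1 : (aStep arr).1 = PySem.List.pyGetD arr0 i 0 := by
          rw [hm3, hstep2, hvcur]
        obtain ⟨f, rfl⟩ : ∃ f, fuel = f + 1 := ⟨fuel - 1, by omega⟩
        rw [show aLoop (f + 1) arr score =
            (if (aStep arr).1 = 0 then score
             else if 0 < (aStep arr).2 ∧ (aStep arr).2 < (arr.length : Int) - 1 then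
               aLoop f
                 (PySem.List.pySetD (PySem.List.pySetD (PySem.List.pySetD arr
                   ((aStep arr).2 - 1) 0) ((aStep arr).2 + 1) 0) ((aStep arr).2) 0)
                 (score + PySem.List.pyGetD arr (aStep arr).2 0)
             else aLoop f arr score) from rfl]
        rw [if_neg (by rw [hstep1]; omega), if_pos (by rw [hstep2]; exact ⟨by omega, by omega⟩),
          hstep2, hvcur]
        have hcv : ∀ j : Int, 0 ≤ j → j < (arr0.length : Int) →
            PySem.List.pyGetD (PySem.List.pySetD (PySem.List.pySetD (PySem.List.pySetD arr
              (i - 1) 0) (i + 1) 0) i 0) j 0 =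
            if j = i - 1 ∨ j = i ∨ j = i + 1 then 0 else PySem.List.pyGetD arr j 0 := by
          intro j h1 h2
          exact cv_set3 arr i 0 hi1 (by omega) j h1 (by omega) 0
        have hav : ∀ j : Int, 0 ≤ j → j < (arr0.length : Int) →
            PySem.List.pyGetD (PySem.List.pySetD (PySem.List.pySetD (PySem.List.pySetD alive
              (i - 1) false) i false) (i + 1) false) j true =
            if j = i - 1 ∨ j = i ∨ j = i + 1 then false
            else PySem.List.pyGetD alive j true := by
          intro j h1 h2
          exact av_set3 alive i false (by omega) (by omega) j h1 (by omega) true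
        refine IH f _ _ _ ?_ ?_ hpair2
          (fun j hj => hmem j (List.mem_cons_of_mem _ hj)) ?_ ?_ ?_ ?_
        · rw [len_setD, len_setD, len_setD]; exact hlen
        · rw [len_setD, len_setD, len_setD]; exact halen
        · -- C3
          intro j h1 h2 ha
          rw [hav j (by omega) (by omega)] at ha
          by_cases h3 : j = i - 1 ∨ j = i ∨ j = i + 1
          · rw [if_pos h3] at ha; simp at ha
          · rw [if_neg h3] at ha
            rcases List.mem_cons.mp (hC3 j h1 h2 ha) with rfl | h
            · exact absurd (Or.inr (Or.inl rfl)) h3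
            · exact h
        · -- C4
          intro j h1 h2
          rw [hcv j h1 h2, hav j h1 h2]
          by_cases h3 : j = i - 1 ∨ j = i ∨ j = i + 1
          · rw [if_pos h3, if_pos h3]; simp
          · rw [if_neg h3, if_neg h3]; exact hC4 j h1 h2
        · -- invariant: i itself is now a dead interior index
          refine ⟨i, hi1, hi2, Or.inl ?_⟩
          rw [hav i (by omega) (by omega), if_pos (Or.inr (Or.inl rfl))]
        · simp at hfuel ⊢; omega

-- two helpers for the top level
theorem getD_repeat_true (n : Nat) (j : Int) (h0 : 0 ≤ j) (h : j < (n : Int)) :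
    PySem.List.pyGetD (PySem.List.pyRepeat [true] ((n : Nat) : Int)) j true = true := by
  rw [PySem.List.pyRepeat_singleton]
  rw [PySem.List.pyGetD_eq_getElem _ true h0 (by simpa using h)]
  exact List.getElem_replicate _

theorem len_repeat_true (n : Nat) :
    (PySem.List.pyRepeat [true] ((n : Nat) : Int)).length = n := by
  rw [PySem.List.pyRepeat_singleton]; simp

-- ===== VERDICT (by name: the statements are the Claim_ definitions above) =====
theorem max_score_spec : Claim_unchanged_max_score := by
  intro arr score hdom hpre
  obtain ⟨hlen2, hpre2⟩ := hpre
  unfold Spec_max_score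
  intro hnd
  rcases lt_or_ge arr.length 3 with hsmall | hn3
  · -- arr.length = 2, arr[1] = 0 : both sides are score
    have h2 : arr.length = 2 := by omega
    have hz : arr.getD 1 0 = 0 := hpre2 h2
    have hz' : PySem.List.pyGetD arr (1 : Int) 0 = 0 := by
      rw [show (1 : Int) = ((1 : Nat) : Int) from rfl, PySem.List.pyGetD_natCast]
      exact hz
    have hstep : (aStep arr).1 = 0 := by
      rw [aStep_eq_amax arr, amax_nil arr 2 ((arr.length : Int) - 1)
        (by rw [h2]; norm_num) _]
      exact hz'
    have hAv : max_score arr score = score := by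
      unfold max_score
      obtain ⟨f, hf⟩ : ∃ f, arr.length + 1 = f + 1 := ⟨arr.length, rfl⟩
      rw [hf]
      exact aLoop_zero f arr score hstep
    have hBv : max_score_alt arr score = score := by
      show bScan (PySem.List.sorted2 (PySem.List.pyRange 1 ((arr.length : Int) - 1) 1)
          (fun i => PySem.List.pyGetD arr i 0) (fun i => i) true) arr
          (PySem.List.pyRepeat [true] (arr.length : Int)) score = score
      rw [show PySem.List.pyRange 1 ((arr.length : Int) - 1) 1 = [] from
        PySem.List.pyRange_one_eq_nil (by rw [h2]; norm_num)]
      rfl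
    rw [hAv, hBv]
  · -- main case: some interior entry is ≥ 0 (from ¬ D_)
    have hpos : ∃ j0 : Int, 1 ≤ j0 ∧ j0 < (arr.length : Int) - 1 ∧
        0 ≤ PySem.List.pyGetD arr j0 0 := by
      unfold D_max_score at hnd
      push_neg at hnd
      obtain ⟨j0, hj0m, hj0v⟩ := hnd hn3
      rw [PySem.List.mem_pyRange_one] at hj0m
      exact ⟨j0, hj0m.1, hj0m.2, by omega⟩
    obtain ⟨j0, hj1, hj2, hj3⟩ := hpos
    show aLoop (arr.length + 1) arr score = bScan
        (PySem.List.sorted2 (PySem.List.pyRange 1 ((arr.length : Int) - 1) 1)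
          (fun i => PySem.List.pyGetD arr i 0) (fun i => i) true) arr
        (PySem.List.pyRepeat [true] (arr.length : Int)) score
    have hperm := PySem.List.sorted2_perm (PySem.List.pyRange 1 ((arr.length : Int) - 1) 1)
      (fun i => PySem.List.pyGetD arr i 0) (fun i => i) true
    refine key arr hn3 _ (arr.length + 1) arr _ score rfl (len_repeat_true arr.length)
      (sorted2_pairwise_lexGt arr _ (PySem.List.nodup_pyRange_one 1 _)) ?_ ?_ ?_ ?_ ?_
    · intro j hj
      have := (hperm.mem_iff).mp hj
      rw [PySem.List.mem_pyRange_one] at this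
      omega
    · intro j h1 h2 _
      exact (hperm.mem_iff).mpr ((PySem.List.mem_pyRange_one).mpr ⟨h1, by omega⟩)
    · intro j h1 h2
      rw [if_pos (getD_repeat_true arr.length j h1 h2)]
    · exact ⟨j0, hj1, hj2, Or.inr hj3⟩
    · have := hperm.length_eq
      rw [PySem.List.length_pyRange_one] at this
      rw [this]
      omega

theorem max_score_changed : Claim_changed_max_score := by
  unfold Claim_changed_max_score; decide

theorem max_score_tight : Claim_exact_max_score := by
  intro arr score hdom hpre hD
  obtain ⟨hn3, hneg⟩ := hD
  have hnegI : ∀ j : Int, 1 ≤ j → j < (arr.length : Int) - 1 →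
      PySem.List.pyGetD arr j 0 < 0 := by
    intro j h1 h2
    exact hneg j ((PySem.List.mem_pyRange_one).mpr ⟨h1, h2⟩)
  -- B returns score: the first index of the sorted order is live with a negative value
  have hBv : max_score_alt arr score = score := by
    have hperm := PySem.List.sorted2_perm (PySem.List.pyRange 1 ((arr.length : Int) - 1) 1)
      (fun i => PySem.List.pyGetD arr i 0) (fun i => i) true
    show bScan (PySem.List.sorted2 (PySem.List.pyRange 1 ((arr.length : Int) - 1) 1)
        (fun i => PySem.List.pyGetD arr i 0) (fun i => i) true) arr
        (PySem.List.pyRepeat [true] (arr.length : Int)) score = score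
    set ord := PySem.List.sorted2 (PySem.List.pyRange 1 ((arr.length : Int) - 1) 1)
        (fun i => PySem.List.pyGetD arr i 0) (fun i => i) true with hord
    have hlen : ord.length = (arr.length - 2 : Nat) := by
      rw [hord, hperm.length_eq, PySem.List.length_pyRange_one]
      omega
    cases hords : ord with
    | nil => rw [hords] at hlen; simp at hlen; omega
    | cons i rest =>
      have hiI : 1 ≤ i ∧ i < (arr.length : Int) - 1 := by
        have hmemord : i ∈ ord := by rw [hords]; exact List.mem_cons_self
        have := (hperm.mem_iff).mp hmemord
        rwa [PySem.List.mem_pyRange_one] at this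
      have hvI : PySem.List.pyGetD arr i 0 < 0 := hnegI i hiI.1 hiI.2
      have halive : PySem.List.pyGetD (PySem.List.pyRepeat [true] (arr.length : Int)) i true
          = true := getD_repeat_true arr.length i (by omega) (by omega)
      have hunf : bScan (i :: rest) arr (PySem.List.pyRepeat [true] (arr.length : Int)) score
          = if PySem.List.pyGetD arr i 0 ≤ 0 then score
            else bScan rest arr
              (PySem.List.pySetD (PySem.List.pySetD (PySem.List.pySetD
                (PySem.List.pyRepeat [true] (arr.length : Int)) (i - 1) false) i false)
                (i + 1) false) (score + PySem.List.pyGetD arr i 0) := by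
        rw [PySem.List.pyRepeat_singleton] at halive
        simp only [Int.toNat_natCast] at halive
        simp [bScan, halive]
      rw [hunf, if_pos (le_of_lt hvI)]
  -- A returns score + arr[m] with arr[m] < 0
  obtain ⟨⟨hm1, hm2, hm3⟩, _⟩ := aStep_spec arr hn3
  have hmv : PySem.List.pyGetD arr (aStep arr).2 0 < 0 := hnegI _ hm1 hm2
  have hAv : max_score arr score = score + PySem.List.pyGetD arr (aStep arr).2 0 := by
    unfold max_score
    obtain ⟨f, hf⟩ : ∃ f, arr.length + 1 = f + 1 + 1 := ⟨arr.length - 1, by omega⟩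
    rw [hf]
    rw [show aLoop (f + 1 + 1) arr score =
        (if (aStep arr).1 = 0 then score
         else if 0 < (aStep arr).2 ∧ (aStep arr).2 < (arr.length : Int) - 1 then
           aLoop (f + 1)
             (PySem.List.pySetD (PySem.List.pySetD (PySem.List.pySetD arr
               ((aStep arr).2 - 1) 0) ((aStep arr).2 + 1) 0) ((aStep arr).2) 0)
             (score + PySem.List.pyGetD arr (aStep arr).2 0)
         else aLoop (f + 1) arr score) from rfl]
    rw [if_neg (by omega), if_pos ⟨by omega, hm2⟩]
    set m := (aStep arr).2 with hm
    have hL : ((PySem.List.pySetD (PySem.List.pySetD (PySem.List.pySetD arr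
        (m - 1) 0) (m + 1) 0) m 0).length : Int) = (arr.length : Int) := by
      rw [len_setD, len_setD, len_setD]
    refine aLoop_zero f _ _ (aStep_zero _ (by omega) ?_ ?_)
    · intro j h1 h2
      rw [hL] at h2
      rw [cv_set3 arr m 0 hm1 hm2 j (by omega) (by omega) 0]
      split_ifs with h3
      · omega
      · exact le_of_lt (hnegI j h1 h2)
    · refine ⟨m, hm1, by rw [hL]; exact hm2, ?_⟩
      rw [cv_set3 arr m 0 hm1 hm2 m (by omega) (by omega) 0]
      simp
  rw [hAv, hBv]
  omega
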